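-- pv_equiv track=rewrite | github.com/uygarpolat/leetcode-daily | 2025-08/2025.08.16-Easy.py | maximum69Number
-- ===== SOURCE A (Python) =====
-- def maximum69Number (num: int) -> int:
-- 	digit = 0
-- 	index = -1
-- 	num2 = num
-- 	while num2:
-- 		if num2 % 10 == 6:
-- 			index = digit
-- 		num2 //= 10
-- 		digit += 1
-- 	return num + (10**index) * 3 if index > -1 else num
-- ===== SOURCE B (Python) =====
-- def maximum69Number(num: int) -> int:
--     # Recursive most-significant-first rebuild: change the leftmost 6 to 9 while
--     # reassembling the number digit by digit; a flag says whether a 6 was already changed.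
--     def go(n):
--         if n == 0:
--             return (0, False)
--         head, changed = go(n // 10)
--         d = n % 10
--         if changed:
--             return (head * 10 + d, True)
--         if d == 6:
--             return (head * 10 + 9, True)
--         return (head * 10 + d, False)
--     return go(num)[0]
-- ===== Notes on version B (the rewrite author's own statement) =====
-- stated objective: alternative
-- what changed: B rebuilds the number recursively most-significant-digit-first with a changed-flag, replacing the leftmost 6 with 9 in place, instead of A's least-significant-first scan that tracks the last index of a 6 and then adds 3*10**index.
import Mathlib
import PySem

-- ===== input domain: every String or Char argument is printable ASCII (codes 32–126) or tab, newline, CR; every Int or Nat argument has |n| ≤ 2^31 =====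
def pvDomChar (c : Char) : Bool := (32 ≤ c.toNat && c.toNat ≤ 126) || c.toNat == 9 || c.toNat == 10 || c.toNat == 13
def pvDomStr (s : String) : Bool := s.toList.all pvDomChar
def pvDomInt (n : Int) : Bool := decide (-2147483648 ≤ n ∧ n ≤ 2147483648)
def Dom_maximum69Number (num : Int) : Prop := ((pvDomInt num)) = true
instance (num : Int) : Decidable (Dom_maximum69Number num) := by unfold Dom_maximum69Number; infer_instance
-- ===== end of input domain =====

-- B rebuilds the number recursively most-significant-digit-first with a changed-flag instead of
-- A's least-significant-first scan tracking the index of the last seen 6 (objective: alternative).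

-- ===== PORT A =====
-- A's while-loop: on Pre_ (num ≥ 0) num2 stays ≥ 0, so 'while num2:' is exactly 'while num2 > 0'
-- (the guard '¬ num2 ≤ 0' below); Python's num2 % 10 / num2 //= 10 are PySem.Int.mod / floordiv.
def maximum69Number_loopA (num2 digit index : Int) : Int :=
  if h : num2 ≤ 0 then index
  else
    maximum69Number_loopA (PySem.Int.floordiv num2 10) (digit + 1)
      (if PySem.Int.mod num2 10 = 6 then digit else index)
termination_by num2.toNat
decreasing_by
  rw [PySem.Int.floordiv_eq_ediv_of_pos (by norm_num : (0:Int) < 10)]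
  omega

def maximum69Number (num : Int) : Int :=
  let index := maximum69Number_loopA num 0 (-1)
  if index > -1 then num + 10 ^ index.toNat * 3 else num

-- ===== PORT B =====
-- B's recursive helper go: 'if n == 0' is the base case; on Pre_ n stays ≥ 0, so the guard
-- 'n ≤ 0' below coincides with n == 0 on every reached call.
def maximum69Number_go (n : Int) : Int × Bool :=
  if _h : n ≤ 0 then (0, false)
  else
    let r := maximum69Number_go (PySem.Int.floordiv n 10)
    let d := PySem.Int.mod n 10
    if r.2 then (r.1 * 10 + d, true)
    else if d = 6 then (r.1 * 10 + 9, true)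
    else (r.1 * 10 + d, false)
termination_by n.toNat
decreasing_by
  rw [PySem.Int.floordiv_eq_ediv_of_pos (by norm_num : (0:Int) < 10)]
  omega

def maximum69Number_alt (num : Int) : Int :=
  (maximum69Number_go num).1

-- ===== PRECONDITION & SPEC =====
-- A's while-loop never terminates for num < 0 (num2 //= 10 reaches -1 and stays there), so A
-- returns exactly on num ≥ 0; Pre_ excludes nothing A returns on.
def Pre_maximum69Number (num : Int) : Prop := 0 ≤ num
instance (num : Int) : Decidable (Pre_maximum69Number num) := by unfold Pre_maximum69Number; infer_instance
def pvWitness_maximum69Number : Int := (9669)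

def Spec_maximum69Number (num : Int) (out : Int) : Prop := out = maximum69Number_alt num
instance (num : Int) (out : Int) : Decidable (Spec_maximum69Number num out) := by unfold Spec_maximum69Number; infer_instance

-- ===== CLAIM (what is proved, stated in full; the proofs are below) =====
def Claim_equal_maximum69Number : Prop := ∀ (num : Int), Dom_maximum69Number num → Pre_maximum69Number num → Spec_maximum69Number num (maximum69Number num)

-- ===== LEMMAS AND PROOFS =====

-- Reference: position (from the least significant digit) of the MOST significant digit 6, if any.
def msSix (n : Int) : Option Nat :=
  if _h : n ≤ 0 then none
  else
    match msSix (PySem.Int.floordiv n 10) with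
    | some k => some (k + 1)
    | none => if PySem.Int.mod n 10 = 6 then some 0 else none
termination_by n.toNat
decreasing_by
  rw [PySem.Int.floordiv_eq_ediv_of_pos (by norm_num : (0:Int) < 10)]
  omega

theorem loopA_eq_msSix (n d i : Int) :
    maximum69Number_loopA n d i =
      match msSix n with
      | some k => d + k
      | none => i := by
  induction n, d, i using maximum69Number_loopA.induct with
  | case1 n d i h =>
    rw [maximum69Number_loopA, msSix]
    simp [h]
  | case2 n d i h ih =>
    rw [maximum69Number_loopA, msSix]
    simp only [h, dite_false]
    rw [dite_eq_ite] at ih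
    rw [ih]
    cases hm : msSix (PySem.Int.floordiv n 10) with
    | some k => push_cast; ring_nf
    | none => split_ifs <;> simp

theorem go_eq_msSix (n : Int) (hn : 0 ≤ n) :
    maximum69Number_go n =
      match msSix n with
      | some k => (n + 3 * 10 ^ k, true)
      | none => (n, false) := by
  induction n using maximum69Number_go.induct with
  | case1 n h =>
    rw [maximum69Number_go, msSix]
    have : n = 0 := le_antisymm h hn
    simp [this]
  | case2 n h r hr ih =>
    have h10 : (0:Int) < 10 := by norm_num
    have hq : 0 ≤ PySem.Int.floordiv n 10 := by
      rw [PySem.Int.floordiv_eq_ediv_of_pos h10]; omega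
    have hg := ih hq
    have hrec := PySem.Int.floordiv_mul_add_mod n 10
    rw [PySem.Int.floordiv_eq_ediv_of_pos h10, PySem.Int.mod_eq_emod_of_pos h10] at hrec
    rw [maximum69Number_go, msSix]
    simp only [h, dite_false]
    cases hm : msSix (PySem.Int.floordiv n 10) with
    | some k =>
      rw [hm] at hg
      rw [hg]
      simp [Prod.ext_iff, pow_succ]
      linarith
    | none =>
      rw [hm] at hg
      rw [hg]
      by_cases hd0 : n % 10 = 6
      · simp [hd0, Prod.ext_iff]; omega
      · simp [hd0, Prod.ext_iff]; omega
  | case3 n h r d hnr hd6 ih =>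
    have h10 : (0:Int) < 10 := by norm_num
    have hq : 0 ≤ PySem.Int.floordiv n 10 := by
      rw [PySem.Int.floordiv_eq_ediv_of_pos h10]; omega
    have hg := ih hq
    have hrec := PySem.Int.floordiv_mul_add_mod n 10
    rw [PySem.Int.floordiv_eq_ediv_of_pos h10, PySem.Int.mod_eq_emod_of_pos h10] at hrec
    rw [maximum69Number_go, msSix]
    simp only [h, dite_false]
    cases hm : msSix (PySem.Int.floordiv n 10) with
    | some k =>
      rw [hm] at hg
      rw [hg]
      simp [Prod.ext_iff, pow_succ]
      linarith
    | none =>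
      rw [hm] at hg
      rw [hg]
      by_cases hd0 : n % 10 = 6
      · simp [hd0, Prod.ext_iff]; omega
      · simp [hd0, Prod.ext_iff]; omega
  | case4 n h r d hnr hd ih =>
    have h10 : (0:Int) < 10 := by norm_num
    have hq : 0 ≤ PySem.Int.floordiv n 10 := by
      rw [PySem.Int.floordiv_eq_ediv_of_pos h10]; omega
    have hg := ih hq
    have hrec := PySem.Int.floordiv_mul_add_mod n 10
    rw [PySem.Int.floordiv_eq_ediv_of_pos h10, PySem.Int.mod_eq_emod_of_pos h10] at hrec
    rw [maximum69Number_go, msSix]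
    simp only [h, dite_false]
    cases hm : msSix (PySem.Int.floordiv n 10) with
    | some k =>
      rw [hm] at hg
      rw [hg]
      simp [Prod.ext_iff, pow_succ]
      linarith
    | none =>
      rw [hm] at hg
      rw [hg]
      by_cases hd0 : n % 10 = 6
      · simp [hd0, Prod.ext_iff]; omega
      · simp [hd0, Prod.ext_iff]; omega

-- ===== VERDICT (by name: the statement is the Claim_ definition above) =====
theorem maximum69Number_spec : Claim_equal_maximum69Number := by
  intro num _ hpre
  unfold Spec_maximum69Number maximum69Number maximum69Number_alt
  rw [loopA_eq_msSix, go_eq_msSix num hpre]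
  cases hm : msSix num with
  | some k =>
    simp only [zero_add, Int.toNat_natCast]
    rw [if_pos (by omega : ((k : Int) > -1))]
    ring
  | none => simp
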